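-- pv_equiv track=rewrite | github.com/lyricsyee/MLSL-Net | datasets/multi_scale_loader.py | trans_label
-- ===== SOURCE A (Python) =====
-- def trans_label(label, number):
--     label_dict = {
--         "cal": [[6], [1, 2, 3, 4, 5]],
--         "spi": [[1, 2], [3, 4, 5]],
--         "lob": [[1, 2], [3, 4, 5]],
--         "tex": [[5], [4, 3], [2, 1]],
--         "sph": [[4, 5], [1, 2, 3]],
--         "mar": [[3, 4, 5], [1, 2]],
--         "sub": [[3, 4, 5], [1, 2]],
--         "mal": [[1, 2, 3], [4, 5]] }
--     label_list = label_dict[label]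
--     binary_label = -1
--     for i in range(len(label_list)):
--         if number in label_list[i]:
--             binary_label = i
--     assert binary_label != -1
--     if label != 'tex':
--         return [binary_label]
--     elif binary_label == 1: # pggo=0, mggo=1
--         return [0, 1]
--     elif binary_label == 2: # pggo=1, mggo=0
--         return [1, 0]
--     elif binary_label == 0: # pggp=0, mggo=0
--         return [0, 0]
--     else:
--         raise Exception
-- ===== SOURCE B (Python) =====
-- _TABLE = {
--     "cal": {6: [0], 1: [1], 2: [1], 3: [1], 4: [1], 5: [1]},
--     "spi": {1: [0], 2: [0], 3: [1], 4: [1], 5: [1]},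
--     "lob": {1: [0], 2: [0], 3: [1], 4: [1], 5: [1]},
--     "tex": {5: [0, 0], 4: [0, 1], 3: [0, 1], 2: [1, 0], 1: [1, 0]},
--     "sph": {4: [0], 5: [0], 1: [1], 2: [1], 3: [1]},
--     "mar": {3: [0], 4: [0], 5: [0], 1: [1], 2: [1]},
--     "sub": {3: [0], 4: [0], 5: [0], 1: [1], 2: [1]},
--     "mal": {1: [0], 2: [0], 3: [0], 4: [1], 5: [1]},
-- }
--
-- def trans_label(label, number):
--     inner = _TABLE[label]          # KeyError on unknown label, as in A
--     out = inner.get(number)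
--     assert out is not None         # AssertionError on unknown number, as in A
--     return list(out)
-- ===== Notes on version B (the rewrite author's own statement) =====
-- stated objective: simpler
-- what changed: Replaces the per-label bucket scan plus tex if/elif chain by a precomputed nested table mapping each label to a dict from number to the final output list, so the loop and the classification branches disappear.
import Mathlib
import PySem

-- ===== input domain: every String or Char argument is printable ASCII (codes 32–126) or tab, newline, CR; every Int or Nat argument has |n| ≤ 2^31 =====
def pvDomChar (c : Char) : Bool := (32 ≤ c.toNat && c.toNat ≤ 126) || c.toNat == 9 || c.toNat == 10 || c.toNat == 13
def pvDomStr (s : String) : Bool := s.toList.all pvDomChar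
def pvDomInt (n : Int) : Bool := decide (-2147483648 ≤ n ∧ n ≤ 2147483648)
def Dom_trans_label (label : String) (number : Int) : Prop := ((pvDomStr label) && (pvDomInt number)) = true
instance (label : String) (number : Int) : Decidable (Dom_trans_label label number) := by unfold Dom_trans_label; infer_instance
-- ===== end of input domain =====

-- B replaces the bucket scan and tex branch chain by one precomputed label→number→output table (simpler).
-- ===== PORT A =====
-- the literal dict from A (insertion order)
def pvLabelDict : PySem.Dict String (List (List Int)) :=
  PySem.Dict.ofList
  [("cal", [[6], [1, 2, 3, 4, 5]]),
   ("spi", [[1, 2], [3, 4, 5]]),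
   ("lob", [[1, 2], [3, 4, 5]]),
   ("tex", [[5], [4, 3], [2, 1]]),
   ("sph", [[4, 5], [1, 2, 3]]),
   ("mar", [[3, 4, 5], [1, 2]]),
   ("sub", [[3, 4, 5], [1, 2]]),
   ("mal", [[1, 2, 3], [4, 5]])]

def trans_label (label : String) (number : Int) : List Int :=
  match PySem.Dict.get? pvLabelDict label with
  | none => []  -- Python raises KeyError here (outside Pre_)
  | some label_list =>
    let binary_label : Int :=
      (PySem.List.pyRange 0 (label_list.length : Int) 1).foldl
        (fun acc i =>
          match PySem.List.pyGet? label_list i with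
          | some bucket => if number ∈ bucket then i else acc
          | none => acc) (-1)
    if binary_label = -1 then []  -- Python raises AssertionError here (outside Pre_)
    else if label ≠ "tex" then [binary_label]
    else if binary_label = 1 then [0, 1]
    else if binary_label = 2 then [1, 0]
    else if binary_label = 0 then [0, 0]
    else []  -- Python raises Exception here (unreachable)

-- ===== PORT B =====
def pvTable : PySem.Dict String (PySem.Dict Int (List Int)) :=
  PySem.Dict.ofList
  [("cal", PySem.Dict.ofList [(6, [0]), (1, [1]), (2, [1]), (3, [1]), (4, [1]), (5, [1])]),
   ("spi", PySem.Dict.ofList [(1, [0]), (2, [0]), (3, [1]), (4, [1]), (5, [1])]),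
   ("lob", PySem.Dict.ofList [(1, [0]), (2, [0]), (3, [1]), (4, [1]), (5, [1])]),
   ("tex", PySem.Dict.ofList [(5, [0, 0]), (4, [0, 1]), (3, [0, 1]), (2, [1, 0]), (1, [1, 0])]),
   ("sph", PySem.Dict.ofList [(4, [0]), (5, [0]), (1, [1]), (2, [1]), (3, [1])]),
   ("mar", PySem.Dict.ofList [(3, [0]), (4, [0]), (5, [0]), (1, [1]), (2, [1])]),
   ("sub", PySem.Dict.ofList [(3, [0]), (4, [0]), (5, [0]), (1, [1]), (2, [1])]),
   ("mal", PySem.Dict.ofList [(1, [0]), (2, [0]), (3, [0]), (4, [1]), (5, [1])])]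

def trans_label_alt (label : String) (number : Int) : List Int :=
  match PySem.Dict.get? pvTable label with
  | none => []  -- Python raises KeyError here (outside Pre_)
  | some inner =>
    match PySem.Dict.get? inner number with
    | none => []  -- Python raises AssertionError here (outside Pre_)
    | some out => out

-- ===== PRECONDITION & SPEC =====
-- Pre_ excludes exactly the inputs on which A raises: unknown labels (KeyError) and
-- numbers outside the label's buckets (AssertionError).
def Pre_trans_label (label : String) (number : Int) : Prop :=
  (label = "cal" ∧ (number = 6 ∨ (1 ≤ number ∧ number ≤ 5))) ∨
  ((label = "spi" ∨ label = "lob" ∨ label = "tex" ∨ label = "sph" ∨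
    label = "mar" ∨ label = "sub" ∨ label = "mal") ∧ 1 ≤ number ∧ number ≤ 5)
instance (label : String) (number : Int) : Decidable (Pre_trans_label label number) := by
  unfold Pre_trans_label; infer_instance
def pvWitness_trans_label : String × Int := ("tex", 3)

def Spec_trans_label (label : String) (number : Int) (out : List Int) : Prop := out = trans_label_alt label number
instance (label : String) (number : Int) (out : List Int) : Decidable (Spec_trans_label label number out) := by unfold Spec_trans_label; infer_instance

-- ===== CLAIM (what is proved, stated in full; the proofs are below) =====
def Claim_equal_trans_label : Prop := ∀ (label : String) (number : Int), Dom_trans_label label number → Pre_trans_label label number → Spec_trans_label label number (trans_label label number)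

-- ===== LEMMAS AND PROOFS =====

-- ===== VERDICT (by name: the statement is the Claim_ definition above) =====
theorem trans_label_spec : Claim_equal_trans_label := by
  intro label number _ hpre
  unfold Spec_trans_label
  rcases hpre with ⟨hl, hn⟩ | ⟨hl, h1, h2⟩
  · subst hl
    rcases hn with h6 | ⟨h1, h2⟩
    · subst h6; decide
    · interval_cases number <;> decide
  · rcases hl with h | h | h | h | h | h | h <;> subst h <;> interval_cases number <;> decide
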